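-- pv_equiv track=rewrite | github.com/yankaics/dianjing | core/resource.py | filter_money
-- ===== SOURCE A (Python) =====
-- MONEY = {
--     30000: 'diamond',  # 钻石
--     30001: 'gold',  # 金币
--     30002: 'renown',  # 声望
--     30003: 'crystal',  # 水晶
--     30004: 'gas',  # 气矿
-- }
--
-- def filter_money(items):
--     # items: [(id, amount), (id, amount)...]
--     """
--
--     :rtype: dict[string, int]
--     """
--     money = {}
--     for _id, _amount in items:
--         name = MONEY.get(_id, None)
--         if not name:
--             continue
--
--         if name in money:
--             money[name] += _amount
--         else:
--             money[name] = _amount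
--
--     return money
-- ===== SOURCE B (Python) =====
-- MONEY = {
--     30000: 'diamond',  # 钻石
--     30001: 'gold',  # 金币
--     30002: 'renown',  # 声望
--     30003: 'crystal',  # 水晶
--     30004: 'gas',  # 气矿
-- }
--
-- def filter_money(items):
--     # Pass 1: distinct money names in first-occurrence order.
--     names = []
--     for _id, _ in items:
--         name = MONEY.get(_id)
--         if name is not None and name not in names:
--             names.append(name)
--     # Pass 2: per-name filtered sum, assembled as a comprehension.
--     return {name: sum(a for i, a in items if MONEY.get(i) == name) for name in names}
-- ===== Notes on version B (the rewrite author's own statement) =====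
-- stated objective: alternative
-- what changed: Replaces A's single incremental dict-accumulate loop with a two-pass pipeline: first collect the distinct money names in first-occurrence order, then build the result dict by a comprehension that filter-and-sums the amounts for each name.
import Mathlib
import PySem

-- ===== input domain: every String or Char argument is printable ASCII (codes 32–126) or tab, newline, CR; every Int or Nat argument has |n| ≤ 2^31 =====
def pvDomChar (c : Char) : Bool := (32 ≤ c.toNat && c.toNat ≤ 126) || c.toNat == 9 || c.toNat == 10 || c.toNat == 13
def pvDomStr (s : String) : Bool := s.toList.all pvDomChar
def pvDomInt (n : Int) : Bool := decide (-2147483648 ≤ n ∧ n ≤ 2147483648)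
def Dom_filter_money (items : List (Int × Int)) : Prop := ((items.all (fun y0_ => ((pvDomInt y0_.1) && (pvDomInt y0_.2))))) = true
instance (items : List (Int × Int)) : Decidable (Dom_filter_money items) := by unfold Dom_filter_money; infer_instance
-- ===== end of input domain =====

-- B replaces A's incremental dict-accumulate loop by a two-pass pipeline (collect distinct
-- names in first-occurrence order, then per-name filter-and-sum); same result, similar cost.

-- ===== PORT A =====
def MONEY : PySem.Dict Int String :=
  PySem.Dict.ofList [(30000, "diamond"), (30001, "gold"), (30002, "renown"),
                     (30003, "crystal"), (30004, "gas")]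

-- `if not name: continue`: name is None or a nonempty string, so this skips exactly the
-- ids missing from MONEY; ported as the `none` branch of the match.
def filter_money (items : List (Int × Int)) : List (String × Int) :=
  (items.foldl (fun money p =>
      match MONEY.get? p.1 with
      | none => money
      | some name =>
        if money.contains name then money.insert name (money.getD name 0 + p.2)
        else money.insert name p.2)
    PySem.Dict.empty).items

-- ===== PORT B =====
def fmSum (items : List (Int × Int)) (name : String) : Int :=
  ((items.filter (fun p => MONEY.get? p.1 == some name)).map (·.2)).sum

def filter_money_alt (items : List (Int × Int)) : List (String × Int) :=
  let names := items.foldl (fun names p =>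
      match MONEY.get? p.1 with
      | some n => if n ∈ names then names else names ++ [n]
      | none => names) []
  names.map (fun n => (n, fmSum items n))

-- ===== PRECONDITION & SPEC =====
def Spec_filter_money (items : List (Int × Int)) (out : List (String × Int)) : Prop := out = filter_money_alt items
instance (items : List (Int × Int)) (out : List (String × Int)) : Decidable (Spec_filter_money items out) := by unfold Spec_filter_money; infer_instance

-- ===== CLAIM (what is proved, stated in full; the proofs are below) =====
def Claim_equal_filter_money : Prop := ∀ (items : List (Int × Int)), Dom_filter_money items → Spec_filter_money items (filter_money items)

-- ===== LEMMAS AND PROOFS =====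

-- first-occurrence names of `items` that are not already in `seen`
def fmNew : List (Int × Int) → List String → List String
  | [], _ => []
  | p :: rest, seen =>
    match MONEY.get? p.1 with
    | some n => if n ∈ seen then fmNew rest seen else n :: fmNew rest (seen ++ [n])
    | none => fmNew rest seen

theorem fmNew_not_mem_seen {m : String} : ∀ (items : List (Int × Int)) (seen : List String),
    m ∈ fmNew items seen → m ∉ seen := by
  intro items
  induction items with
  | nil => intro seen h; simp [fmNew] at h
  | cons p rest ih =>
    intro seen h
    cases hm : MONEY.get? p.1 with
    | none => simp only [fmNew, hm] at h; exact ih seen h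
    | some n =>
      simp only [fmNew, hm] at h
      by_cases hn : n ∈ seen
      · rw [if_pos hn] at h; exact ih seen h
      · rw [if_neg hn, List.mem_cons] at h
        rcases h with h | h
        · subst h; exact hn
        · have := ih _ h; intro hc; exact this (by simp [hc])

theorem fmNames_eq : ∀ (items : List (Int × Int)) (seen : List String),
    items.foldl (fun names p =>
      match MONEY.get? p.1 with
      | some n => if n ∈ names then names else names ++ [n]
      | none => names) seen = seen ++ fmNew items seen := by
  intro items
  induction items with
  | nil => intro seen; simp [fmNew]
  | cons p rest ih =>
    intro seen
    cases hm : MONEY.get? p.1 with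
    | none => simp only [List.foldl_cons, fmNew, hm]; simpa using ih seen
    | some n =>
      simp only [List.foldl_cons, fmNew, hm]
      by_cases hn : n ∈ seen
      · simp only [if_pos hn]; simpa using ih seen
      · simp only [if_neg hn]
        rw [ih (seen ++ [n])]
        simp

theorem fmSum_cons_some {i a : Int} {n : String} (rest : List (Int × Int))
    (h : MONEY.get? i = some n) (m : String) :
    fmSum ((i, a) :: rest) m = if m = n then a + fmSum rest m else fmSum rest m := by
  simp only [fmSum, List.filter_cons, h]
  by_cases hm : m = n
  · subst hm; simp
  · have : (some n == some m) = false := by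
      simp only [beq_eq_false_iff_ne, ne_eq, Option.some.injEq]
      exact fun hc => hm hc.symm
    simp [this, hm]

theorem fmSum_cons_none {i a : Int} (rest : List (Int × Int))
    (h : MONEY.get? i = none) (m : String) :
    fmSum ((i, a) :: rest) m = fmSum rest m := by
  simp [fmSum, h]

theorem fm_loop_items : ∀ (items : List (Int × Int)) (d : PySem.Dict String Int),
    d.keys.Nodup →
    (items.foldl (fun money p =>
        match MONEY.get? p.1 with
        | none => money
        | some name =>
          if money.contains name then money.insert name (money.getD name 0 + p.2)
          else money.insert name p.2) d).items
      = d.items.map (fun e => (e.1, e.2 + fmSum items e.1))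
        ++ (fmNew items d.keys).map (fun n => (n, fmSum items n)) := by
  intro items
  induction items with
  | nil =>
    intro d _
    simp [fmNew, fmSum]
  | cons p rest ih =>
    intro d hnd
    obtain ⟨i, a⟩ := p
    cases hm : MONEY.get? i with
    | none =>
      simp only [List.foldl_cons, fmNew, hm]
      rw [ih d hnd]
      congr 1
      · exact List.map_congr_left (fun e _ => by rw [fmSum_cons_none rest hm])
      · exact List.map_congr_left (fun m _ => by rw [fmSum_cons_none rest hm])
    | some n =>
      simp only [List.foldl_cons, fmNew, hm]
      by_cases hc : d.contains n = true
      · have hn_mem : n ∈ d.keys := (PySem.Dict.contains_iff_mem_keys d n).1 hc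
        simp only [hc, if_true, if_pos hn_mem]
        rw [ih _ (PySem.Dict.nodup_keys_insert d n _ hnd)]
        rw [PySem.Dict.keys_insert_of_contains d _ hc]
        congr 1
        · rw [PySem.Dict.items_insert_of_contains d _ hc, List.map_map]
          refine List.map_congr_left (fun e he => ?_)
          by_cases hen : e.1 = n
          · have hbeq : (e.1 == n) = true := by simp [hen]
            have hget : d.getD n 0 = e.2 := by
              rw [← hen]
              exact PySem.Dict.getD_of_mem_items d (by simpa using he) hnd 0
            simp only [Function.comp_apply, hbeq, if_pos]
            rw [hget, fmSum_cons_some rest hm, if_pos hen, hen]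
            exact congrArg (Prod.mk n) (by ring)
          · have hbeq : (e.1 == n) = false := by simp [hen]
            simp only [Function.comp_apply, hbeq, Bool.false_eq_true, if_false]
            rw [fmSum_cons_some rest hm, if_neg hen]
        · refine List.map_congr_left (fun m hmem => ?_)
          have hns : m ∉ d.keys := fmNew_not_mem_seen rest d.keys hmem
          have hmn : m ≠ n := fun h => hns (h ▸ hn_mem)
          rw [fmSum_cons_some rest hm, if_neg hmn]
      · have hc' : d.contains n = false := by simpa using hc
        have hn_nmem : n ∉ d.keys := fun h => by
          rw [(PySem.Dict.contains_iff_mem_keys d n).2 h] at hc'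
          exact absurd hc' (by simp)
        have hkeys : (d.insert n a).keys = d.keys ++ [n] :=
          PySem.Dict.keys_insert_of_not_contains d _ hc'
        simp only [hc', Bool.false_eq_true, if_false, if_neg hn_nmem]
        rw [ih _ (PySem.Dict.nodup_keys_insert d n _ hnd)]
        rw [hkeys, PySem.Dict.items_insert_of_not_contains d _ hc']
        simp only [List.map_append, List.map_cons, List.map_nil, List.append_assoc]
        congr 1
        · refine List.map_congr_left (fun e he => ?_)
          have hen : e.1 ≠ n := fun h =>
            hn_nmem (h ▸ PySem.Dict.mem_keys_of_mem_items d he)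
          rw [fmSum_cons_some rest hm, if_neg hen]
        · simp only [List.singleton_append, List.cons.injEq]
          refine ⟨by rw [fmSum_cons_some rest hm, if_pos rfl], ?_⟩
          refine List.map_congr_left (fun m hmem => ?_)
          have hns : m ∉ d.keys ++ [n] := fmNew_not_mem_seen rest _ hmem
          have hmn : m ≠ n := fun h => hns (by simp [h])
          rw [fmSum_cons_some rest hm, if_neg hmn]

-- ===== VERDICT (by name: the statement is the Claim_ definition above) =====
theorem filter_money_spec : Claim_equal_filter_money := by
  intro items _
  unfold Spec_filter_money filter_money filter_money_alt
  rw [fm_loop_items items PySem.Dict.empty (by simp)]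
  rw [fmNames_eq items []]
  have h1 : (PySem.Dict.empty : PySem.Dict String Int).items = [] := rfl
  have h2 : (PySem.Dict.empty : PySem.Dict String Int).keys = [] := rfl
  simp [h1, h2]
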